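-- pv_equiv track=rewrite | github.com/narinderdev/Wealth-Management | management/views/summary.py | _fill_month_series
-- ===== SOURCE A (Python) =====
-- def _previous_month(month_key):
--     year, month = month_key
--     if month == 1:
--         return (year - 1, 12)
--     return (year, month - 1)
--
-- def _recent_months(end_month, count):
--     months = []
--     current = end_month
--     for _ in range(count):
--         months.append(current)
--         current = _previous_month(current)
--     return list(reversed(months))
--
-- def _fill_month_series(month_map, max_points):
--     if not month_map:
--         return [], []
--     end_month = max(month_map.keys())
--     months = _recent_months(end_month, max_points)
--     values = []
--     last_value = None
--     for month_key in months:
--         value = month_map.get(month_key)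
--         if value is None:
--             value = last_value
--         else:
--             last_value = value
--         values.append(value)
--     if values and values[0] is None:
--         first_value = next((val for val in values if val is not None), None)
--         if first_value is not None:
--             values = [first_value if val is None else val for val in values]
--     return months, values
-- ===== SOURCE B (Python) =====
-- def _expand(lookups):
--     # run-length expansion: leading gaps are filled with the first present value,
--     # then each present value is replicated over the run of gaps that follows it
--     k = 0
--     while k < len(lookups) and lookups[k] is None:
--         k += 1
--     if k == len(lookups):
--         return lookups[:]          # no present value at all: all-None series
--     values = [lookups[k]] * k
--     rest = lookups[k:]
--     while rest:                    # rest always starts with a present value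
--         v = rest[0]
--         gaps = 0
--         while 1 + gaps < len(rest) and rest[1 + gaps] is None:
--             gaps += 1
--         values += [v] * (1 + gaps)
--         rest = rest[1 + gaps:]
--     return values
--
-- def _fill_month_series(month_map, max_points):
--     if not month_map:
--         return [], []
--     months = []
--     cur = max(month_map)
--     for _ in range(max_points):
--         months.append(cur)
--         y, m = cur
--         cur = (y - 1, 12) if m == 1 else (y, m - 1)
--     months.reverse()
--     lookups = [month_map.get(mk) for mk in months]
--     return months, _expand(lookups)
-- ===== Notes on version B (the rewrite author's own statement) =====
-- stated objective: alternative
-- what changed: B abandons A's forward-fill carry loop and its separate leading-None back-fill comprehension: it maps the month lookups once, then builds the value series by run-length expansion, replicating each present value over its following run of gaps (with leading gaps replicated from the first present value).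
import Mathlib
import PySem

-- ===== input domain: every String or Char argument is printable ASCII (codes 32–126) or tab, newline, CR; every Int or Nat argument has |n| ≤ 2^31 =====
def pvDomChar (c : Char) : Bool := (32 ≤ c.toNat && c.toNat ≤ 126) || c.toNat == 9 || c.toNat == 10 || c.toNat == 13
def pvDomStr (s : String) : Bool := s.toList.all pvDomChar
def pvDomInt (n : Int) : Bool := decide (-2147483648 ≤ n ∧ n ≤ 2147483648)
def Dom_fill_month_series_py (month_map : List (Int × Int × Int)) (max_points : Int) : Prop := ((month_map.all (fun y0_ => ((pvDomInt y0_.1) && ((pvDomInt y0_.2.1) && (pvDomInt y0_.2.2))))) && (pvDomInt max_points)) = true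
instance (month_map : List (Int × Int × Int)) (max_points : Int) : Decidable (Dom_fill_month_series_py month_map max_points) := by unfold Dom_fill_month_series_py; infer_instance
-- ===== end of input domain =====

-- B replaces A's forward-fill carry pass plus leading-None back-fill with a run-length
-- expansion: it splits the lookups at present values and replicates each over its gap run.


-- ===== PORT A =====
def previous_month_py (month_key : Int × Int) : Int × Int :=
  if month_key.2 = 1 then (month_key.1 - 1, 12) else (month_key.1, month_key.2 - 1)

def recent_months_py (end_month : Int × Int) (count : Int) : List (Int × Int) :=
  (((PySem.List.pyRange 0 count 1).foldl
      (fun (s : List (Int × Int) × (Int × Int)) _ => (s.1 ++ [s.2], previous_month_py s.2))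
      ([], end_month)).1).reverse

def fill_month_series_py (month_map : List (Int × Int × Int)) (max_points : Int) :
    (List (Int × Int)) × List (Option Int) :=
  if month_map = [] then ([], [])
  else
    let d := PySem.Dict.ofList (month_map.map (fun e => ((e.1, e.2.1), e.2.2)))
    match PySem.List.max2? d.keys Prod.fst Prod.snd with
    | none => ([], [])  -- unreachable: month_map ≠ [] means the dict has a key
    | some end_month =>
      let months := recent_months_py end_month max_points
      let values := (months.foldl
        (fun (s : List (Option Int) × Option Int) mk =>
          let value := d.get? mk
          if value = none then (s.1 ++ [s.2], s.2) else (s.1 ++ [value], value))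
        ([], none)).1
      let values :=
        if values ≠ [] ∧ values.head? = some none then
          match values.findSome? (fun o => o) with
          | some fv => values.map (fun o => if o = none then some fv else o)
          | none => values
        else values
      (months, values)

-- ===== PORT B =====
-- _runs: the input is empty or starts with a present value, which is replicated over the
-- run of gaps after it (the while-count of leading Nones of the tail = takeWhile length)
def runsB : List (Option Int) → List (Option Int)
  | [] => []
  | v :: t =>
    let gaps := (t.takeWhile (fun o => o = none)).length
    List.replicate (1 + gaps) v ++ runsB (t.drop gaps)
termination_by l => l.length
decreasing_by
  simp only [List.length_drop, List.length_cons]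
  omega

-- _expand: leading gaps get the first present value; the while-count of leading
-- Nones is ported as takeWhile/dropWhile (exact: both count the leading Nones)
def expandB (lookups : List (Option Int)) : List (Option Int) :=
  match lookups.dropWhile (fun o => o = none) with
  | [] => lookups
  | v :: t =>
    List.replicate (lookups.takeWhile (fun o => o = none)).length v ++ runsB (v :: t)

def fill_month_series_py_alt (month_map : List (Int × Int × Int)) (max_points : Int) :
    (List (Int × Int)) × List (Option Int) :=
  if month_map = [] then ([], [])
  else
    let d := PySem.Dict.ofList (month_map.map (fun e => ((e.1, e.2.1), e.2.2)))
    match PySem.List.max2? d.keys Prod.fst Prod.snd with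
    | none => ([], [])  -- unreachable: month_map ≠ [] means the dict has a key
    | some cur0 =>
      let months := (((PySem.List.pyRange 0 max_points 1).foldl
        (fun (s : List (Int × Int) × (Int × Int)) _ =>
          (s.1 ++ [s.2], if s.2.2 = 1 then (s.2.1 - 1, 12) else (s.2.1, s.2.2 - 1)))
        ([], cur0)).1).reverse
      let lookups := months.map (fun mk => d.get? mk)
      (months, expandB lookups)

-- ===== PRECONDITION & SPEC =====
def Spec_fill_month_series_py (month_map : List (Int × Int × Int)) (max_points : Int) (out : (List (Int × Int)) × List (Option Int)) : Prop := out = fill_month_series_py_alt month_map max_points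
instance (month_map : List (Int × Int × Int)) (max_points : Int) (out : (List (Int × Int)) × List (Option Int)) : Decidable (Spec_fill_month_series_py month_map max_points out) := by unfold Spec_fill_month_series_py; infer_instance

-- ===== CLAIM (what is proved, stated in full; the proofs are below) =====
def Claim_equal_fill_month_series_py : Prop := ∀ (month_map : List (Int × Int × Int)) (max_points : Int), Dom_fill_month_series_py month_map max_points → Spec_fill_month_series_py month_map max_points (fill_month_series_py month_map max_points)

-- ===== LEMMAS AND PROOFS =====

-- reference function: forward fill carrying the last seen value
def ffill : Option Int → List (Option Int) → List (Option Int)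
  | _, [] => []
  | last, v :: t =>
    let l := if v = none then last else v
    l :: ffill l t

-- A side -----------------------------------------------------------------

theorem foldA_eq_ffill (d : PySem.Dict (Int × Int) Int) (mks : List (Int × Int))
    (acc : List (Option Int)) (last : Option Int) :
    (mks.foldl
      (fun (s : List (Option Int) × Option Int) mk =>
        let value := d.get? mk
        if value = none then (s.1 ++ [s.2], s.2) else (s.1 ++ [value], value))
      (acc, last)).1 = acc ++ ffill last (mks.map (fun mk => d.get? mk)) := by
  induction mks generalizing acc last with
  | nil => simp [ffill]
  | cons mk t ih =>
    simp only [List.foldl_cons, List.map_cons, ffill]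
    by_cases h : d.get? mk = none <;> simp [h, ih]

theorem none_not_mem_ffill_some (t : List (Option Int)) (x : Int) :
    none ∉ ffill (some x) t := by
  induction t generalizing x with
  | nil => simp [ffill]
  | cons v t ih =>
    cases v with
    | none => simpa [ffill] using ih x
    | some y => simpa [ffill] using ih y

theorem findSome?_ffill_none (vs : List (Option Int)) :
    (ffill none vs).findSome? (fun o => o) = vs.findSome? (fun o => o) := by
  induction vs with
  | nil => rfl
  | cons v t ih =>
    cases v with
    | none => simpa [ffill] using ih
    | some x => simp [ffill]

theorem map_ffill_none_eq_ffill (vs : List (Option Int)) (fv : Int)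
    (h : vs.findSome? (fun o => o) = some fv) :
    (ffill none vs).map (fun o => if o = none then some fv else o) =
      ffill (some fv) vs := by
  induction vs with
  | nil => simp [ffill]
  | cons v t ih =>
    cases v with
    | none =>
      simp only [List.findSome?_cons] at h
      simp [ffill, ih h]
    | some x =>
      simp only [List.findSome?_cons, Option.some.injEq] at h
      subst h
      have hid : (ffill (some x) t).map (fun o => if o = none then some x else o) =
          ffill (some x) t := by
        have h1 : (ffill (some x) t).map (fun o => if o = none then some x else o) =
            (ffill (some x) t).map id := by
          apply List.map_congr_left
          intro o ho
          have hne : o ≠ none := fun he => none_not_mem_ffill_some t x (he ▸ ho)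
          simp [hne]
        rw [h1, List.map_id]
      simp [ffill, hid]

-- A's two-phase fill equals a forward fill seeded with the first present value
theorem twophase_eq_onephase (vs : List (Option Int)) :
    (let values := ffill none vs
     if values ≠ [] ∧ values.head? = some none then
       match values.findSome? (fun o => o) with
       | some fv => values.map (fun o => if o = none then some fv else o)
       | none => values
     else values) = ffill (vs.findSome? (fun o => o)) vs := by
  cases vs with
  | nil => simp [ffill]
  | cons v t =>
    cases v with
    | some x =>
      simp [ffill]
    | none =>
      simp only [ffill, List.findSome?_cons]
      simp only [ne_eq, List.cons_ne_nil, not_false_eq_true, List.head?_cons, and_self,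
        if_true, findSome?_ffill_none]
      cases h : t.findSome? (fun o => o) with
      | none => simp
      | some fv =>
        simp only [reduceIte, List.map_cons]
        simp [map_ffill_none_eq_ffill t fv h]

-- B side -----------------------------------------------------------------

theorem ffill_replicate_none (g : Nat) (c : Option Int) (rest : List (Option Int)) :
    ffill c (List.replicate g none ++ rest) = List.replicate g c ++ ffill c rest := by
  induction g with
  | zero => simp
  | succ g ih => simp [List.replicate_succ, ffill, ih]

theorem takeWhile_none_eq_replicate (t : List (Option Int)) :
    t.takeWhile (fun o => o = none) =
      List.replicate (t.takeWhile (fun o => o = none)).length (none : Option Int) := by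
  rw [List.eq_replicate_iff]
  refine ⟨rfl, fun b hb => ?_⟩
  have := List.mem_takeWhile_imp hb
  simpa using this

theorem dropWhile_eq_drop_len (t : List (Option Int)) :
    t.dropWhile (fun o => o = none) = t.drop (t.takeWhile (fun o => o = none)).length := by
  induction t with
  | nil => rfl
  | cons v t ih =>
    by_cases h : v = none
    · simp [List.dropWhile_cons, List.takeWhile_cons, h, ih]
    · simp [List.dropWhile_cons, List.takeWhile_cons, h]

theorem head_dropWhile_some (t : List (Option Int)) (v : Option Int)
    (rest : List (Option Int)) (h : t.dropWhile (fun o => o = none) = v :: rest) :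
    ∃ x, v = some x := by
  induction t with
  | nil => simp at h
  | cons a t ih =>
    rw [List.dropWhile_cons] at h
    by_cases ha : a = none
    · simp only [ha] at h; simp at h; exact ih h
    · simp [ha] at h
      obtain ⟨x, hx⟩ := Option.ne_none_iff_exists'.mp ha
      exact ⟨x, h.1 ▸ hx⟩

theorem findSome?_replicate_none_append (g : Nat) (l : List (Option Int)) :
    (List.replicate g (none : Option Int) ++ l).findSome? (fun o => o) =
      l.findSome? (fun o => o) := by
  induction g with
  | zero => simp
  | succ g ih => simp [List.replicate_succ, ih]

-- runsB on a some-headed list is a forward fill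
theorem runsB_eq_ffill (n : Nat) : ∀ (t : List (Option Int)), t.length ≤ n → ∀ (x : Int),
    runsB (some x :: t) = ffill (some x) (some x :: t) := by
  induction n with
  | zero =>
    intro t ht x
    have h0 : t = [] := List.length_eq_zero_iff.mp (Nat.le_zero.mp ht)
    subst h0
    simp [runsB, ffill]
  | succ n ih =>
    intro t ht x
    rw [runsB]
    have hsplit : t = List.replicate (t.takeWhile (fun o => o = none)).length none ++
        t.dropWhile (fun o => o = none) := by
      conv_lhs => rw [← List.takeWhile_append_dropWhile (p := fun o => (o = none : Bool)) (l := t)]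
      rw [← takeWhile_none_eq_replicate]
    cases hd : t.dropWhile (fun o => o = none) with
    | nil =>
      rw [dropWhile_eq_drop_len] at hd
      simp only [hd, runsB, List.append_nil]
      have hfr := ffill_replicate_none (t.takeWhile (fun o => o = none)).length (some x) []
      simp only [List.append_nil, ffill] at hfr
      conv_rhs => rw [hsplit, dropWhile_eq_drop_len, hd, List.append_nil]
      simp only [ffill, ite_self, hfr]
      rw [Nat.add_comm, List.replicate_succ]
    | cons v rest =>
      obtain ⟨y, rfl⟩ := head_dropWhile_some t v rest hd
      have hdrop : t.drop (t.takeWhile (fun o => o = none)).length = some y :: rest := by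
        rw [← dropWhile_eq_drop_len, hd]
      have hlen : rest.length ≤ n := by
        have h1 := congrArg List.length hdrop
        simp only [List.length_drop, List.length_cons] at h1
        omega
      rw [hdrop, ih rest hlen y]
      conv_rhs => rw [hsplit, hd]
      simp only [ffill, ite_self, reduceCtorEq, if_false, ffill_replicate_none]
      rw [Nat.add_comm, List.replicate_succ, List.cons_append]

-- B's expansion equals a forward fill seeded with the first present value
theorem expandB_eq_ffill (vs : List (Option Int)) :
    expandB vs = ffill (vs.findSome? (fun o => o)) vs := by
  unfold expandB
  have hsplit : vs = List.replicate (vs.takeWhile (fun o => o = none)).length none ++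
      vs.dropWhile (fun o => o = none) := by
    conv_lhs => rw [← List.takeWhile_append_dropWhile (p := fun o => (o = none : Bool)) (l := vs)]
    rw [← takeWhile_none_eq_replicate]
  cases hd : vs.dropWhile (fun o => o = none) with
  | nil =>
    simp only
    conv_rhs => rw [hsplit, hd, List.append_nil]
    have hfs : (List.replicate (vs.takeWhile (fun o => o = none)).length
        (none : Option Int)).findSome? (fun o => o) = none := by
      have := findSome?_replicate_none_append (vs.takeWhile (fun o => o = none)).length []
      simpa using this
    rw [hfs]
    have hfr := ffill_replicate_none (vs.takeWhile (fun o => o = none)).length none []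
    simp only [List.append_nil, ffill] at hfr
    conv_lhs => rw [hsplit, hd, List.append_nil]
    rw [hfr]
  | cons v rest =>
    obtain ⟨y, rfl⟩ := head_dropWhile_some vs v rest hd
    conv_rhs => rw [hsplit, hd]
    rw [findSome?_replicate_none_append]
    simp only [List.findSome?_cons, ffill_replicate_none]
    rw [runsB_eq_ffill rest.length rest (Nat.le_refl _) y]

-- ===== VERDICT (by name: the statement is the Claim_ definition above) =====
theorem fill_month_series_py_spec : Claim_equal_fill_month_series_py := by
  intro month_map max_points _
  unfold Spec_fill_month_series_py fill_month_series_py fill_month_series_py_alt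
  by_cases hmm : month_map = []
  · simp [hmm]
  · simp only [hmm, if_false]
    set d := PySem.Dict.ofList (month_map.map (fun e => ((e.1, e.2.1), e.2.2))) with hd
    cases hmx : PySem.List.max2? d.keys Prod.fst Prod.snd with
    | none => rfl
    | some em =>
      simp only [recent_months_py, previous_month_py]
      set months := (((PySem.List.pyRange 0 max_points 1).foldl
        (fun (s : List (Int × Int) × (Int × Int)) _ =>
          (s.1 ++ [s.2], if s.2.2 = 1 then (s.2.1 - 1, 12) else (s.2.1, s.2.2 - 1)))
        ([], em)).1).reverse with hmo
      refine Prod.ext rfl ?_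
      simp only
      rw [foldA_eq_ffill d months [] none, List.nil_append, expandB_eq_ffill]
      exact twophase_eq_onephase (months.map (fun mk => d.get? mk))
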